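-- pv_equiv track=rewrite | github.com/RohanModi-CA/BlockSSH | theory/fit-dgnic.py | validate_drop_indices
-- ===== SOURCE A (Python) =====
-- def validate_drop_indices(name, indices, size):
--     unique = sorted(set(indices))
--     if len(unique) != len(indices):
--         raise ValueError(f"{name} contains duplicates: {indices}")
--     for idx in unique:
--         if idx < 1 or idx > size:
--             raise ValueError(f"{name} index {idx} is outside 1..{size}")
--     return unique
-- ===== SOURCE B (Python) =====
-- def validate_drop_indices(name, indices, size):
--     s = sorted(indices)
--     for prev, cur in zip(s, s[1:]):
--         if prev == cur:
--             raise ValueError(f"{name} contains duplicates: {indices}")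
--     if s and (s[0] < 1 or s[-1] > size):
--         bad = s[0] if s[0] < 1 else s[-1]
--         raise ValueError(f"{name} index {bad} is outside 1..{size}")
--     return s
-- ===== Notes on version B (the rewrite author's own statement) =====
-- stated objective: alternative
-- what changed: B sorts the raw list once and detects duplicates by an adjacent-pair scan of the sorted list instead of building a set and comparing lengths, and checks bounds in O(1) via the first and last elements of the sorted list instead of a loop over every element.
import Mathlib
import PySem

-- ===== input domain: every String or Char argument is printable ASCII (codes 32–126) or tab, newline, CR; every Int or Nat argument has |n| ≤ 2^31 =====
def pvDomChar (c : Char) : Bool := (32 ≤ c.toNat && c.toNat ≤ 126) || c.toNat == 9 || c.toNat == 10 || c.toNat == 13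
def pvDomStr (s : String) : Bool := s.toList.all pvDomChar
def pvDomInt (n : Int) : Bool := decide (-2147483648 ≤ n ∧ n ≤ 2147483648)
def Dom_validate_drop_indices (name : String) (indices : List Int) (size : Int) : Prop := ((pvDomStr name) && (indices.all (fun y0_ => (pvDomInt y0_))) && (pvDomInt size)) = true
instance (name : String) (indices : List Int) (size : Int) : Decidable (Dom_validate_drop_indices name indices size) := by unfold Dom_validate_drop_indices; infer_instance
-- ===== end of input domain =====

-- B sorts once and detects duplicates by an adjacent-pair scan, checking bounds via the
-- first/last elements of the sorted list; alternative decomposition, same asymptotic cost.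


-- ===== PORT A =====
-- the 'for idx in unique: if idx < 1 or idx > size: raise' loop; false = the loop raised
def pvBoundsLoopA (idxs : List Int) (size : Int) : Bool :=
  match idxs with
  | [] => true
  | idx :: rest => if idx < 1 ∨ idx > size then false else pvBoundsLoopA rest size

-- raises (duplicates / out-of-range) are excluded by Pre_; those branches return []
def validate_drop_indices (name : String) (indices : List Int) (size : Int) : List Int :=
  let unique := PySem.List.sorted (PySem.Set.ofList indices) (fun x => x) false
  if unique.length ≠ indices.length then []          -- raise ValueError (duplicates)
  else if pvBoundsLoopA unique size then unique
  else []                                            -- raise ValueError (out of range)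

-- ===== PORT B =====
-- 'for prev, cur in zip(s, s[1:]): if prev == cur: raise'; true = a duplicate was found
def pvAdjDupB (s : List Int) : Bool :=
  match s with
  | a :: b :: rest => if a == b then true else pvAdjDupB (b :: rest)
  | _ => false

-- raises are excluded by Pre_; those branches return [].  s[0] = head, s[-1] = last.
def validate_drop_indices_alt (name : String) (indices : List Int) (size : Int) : List Int :=
  let s := PySem.List.sorted indices (fun x => x) false
  if pvAdjDupB s then []                             -- raise ValueError (duplicates)
  else if s ≠ [] ∧ ((s.head?.getD 0) < 1 ∨ (s.getLast?.getD 0) > size) then []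
                                                     -- raise ValueError (out of range)
  else s

-- ===== PRECONDITION & SPEC =====
-- Pre_ excludes exactly the inputs on which A raises ValueError: duplicate indices, or an
-- index outside 1..size.
def Pre_validate_drop_indices (name : String) (indices : List Int) (size : Int) : Prop :=
  indices.Nodup ∧ ∀ i ∈ indices, 1 ≤ i ∧ i ≤ size

instance (name : String) (indices : List Int) (size : Int) : Decidable (Pre_validate_drop_indices name indices size) := by unfold Pre_validate_drop_indices; infer_instance

def pvWitness_validate_drop_indices : String × List Int × Int := ("col", [3, 1, 2], 5)

def Spec_validate_drop_indices (name : String) (indices : List Int) (size : Int) (out : List Int) : Prop := out = validate_drop_indices_alt name indices size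
instance (name : String) (indices : List Int) (size : Int) (out : List Int) : Decidable (Spec_validate_drop_indices name indices size out) := by unfold Spec_validate_drop_indices; infer_instance

-- ===== CLAIM (what is proved, stated in full; the proofs are below) =====
def Claim_equal_validate_drop_indices : Prop := ∀ (name : String) (indices : List Int) (size : Int), Dom_validate_drop_indices name indices size → Pre_validate_drop_indices name indices size → Spec_validate_drop_indices name indices size (validate_drop_indices name indices size)

-- ===== LEMMAS AND PROOFS =====

theorem pvBoundsLoopA_true (idxs : List Int) (size : Int)
    (h : ∀ i ∈ idxs, 1 ≤ i ∧ i ≤ size) : pvBoundsLoopA idxs size = true := by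
  induction idxs with
  | nil => rfl
  | cons a t ih =>
    have ha := h a (List.mem_cons_self)
    simp only [pvBoundsLoopA]
    rw [if_neg (by omega)]
    exact ih (fun i hi => h i (List.mem_cons_of_mem _ hi))

theorem pvAdjDupB_false (s : List Int) (h : s.Nodup) : pvAdjDupB s = false := by
  induction s with
  | nil => rfl
  | cons a t ih =>
    cases t with
    | nil => rfl
    | cons b r =>
      have hne : a ≠ b := by
        intro he; exact (List.nodup_cons.mp h).1 (he ▸ List.mem_cons_self)
      simp only [pvAdjDupB]
      rw [if_neg (by simpa using hne)]
      exact ih (List.nodup_cons.mp h).2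

theorem validate_drop_indices_spec : Claim_equal_validate_drop_indices := by
  intro name indices size _ hpre
  obtain ⟨hnd, hb⟩ := hpre
  set s := PySem.List.sorted indices (fun x => x) false with hs
  have hlen : s.length = indices.length := PySem.List.length_sorted ..
  have hmem : ∀ i ∈ s, 1 ≤ i ∧ i ≤ size := fun i hi =>
    hb i ((PySem.List.mem_sorted ..).mp hi)
  have hsnd : s.Nodup := ((PySem.List.sorted_perm indices (fun x => x) false).nodup_iff).mpr hnd
  have hA : validate_drop_indices name indices size = s := by
    show (if (PySem.List.sorted (PySem.Set.ofList indices) (fun x => x) false).length ≠ indices.length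
            then []
          else if pvBoundsLoopA (PySem.List.sorted (PySem.Set.ofList indices) (fun x => x) false) size
            then PySem.List.sorted (PySem.Set.ofList indices) (fun x => x) false else []) = s
    rw [show PySem.Set.ofList indices = indices from PySem.Set.ofList_eq_self_of_nodup _ hnd, ← hs]
    rw [if_neg (by simp [hlen]), if_pos (pvBoundsLoopA_true s size hmem)]
  have hB : validate_drop_indices_alt name indices size = s := by
    show (if pvAdjDupB s then []
          else if s ≠ [] ∧ ((s.head?.getD 0) < 1 ∨ (s.getLast?.getD 0) > size) then [] else s) = s
    rw [if_neg (by simp [pvAdjDupB_false s hsnd])]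
    by_cases hse : s = []
    · simp [hse]
    · have hh : s.head?.getD 0 ∈ s := by
        cases hc : s with | nil => exact absurd hc hse | cons a t => simp
      have hl : s.getLast?.getD 0 ∈ s := by
        rw [List.getLast?_eq_some_getLast hse]
        simpa using List.getLast_mem hse
      have h1 := hmem _ hh
      have h2 := hmem _ hl
      rw [if_neg (by push Not; intro _; omega)]
  unfold Spec_validate_drop_indices
  rw [hA, hB]
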